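-- pv_equiv track=rewrite | github.com/tcdejong/advent-of-code | 2022/day01/day01.py | part_one
-- ===== SOURCE A (Python) =====
-- def part_one(puzzle_input):
--     current_max = 0
--     current_sum = 0
--
--     for line in puzzle_input:
--         current_sum += line
--         current_max = max(current_sum, current_max)
--
--         if line == 0:
--             current_sum = 0
--
--     return current_max
-- ===== SOURCE B (Python) =====
-- def part_one(puzzle_input):
--     # Split into groups; each zero ends its group, a trailing partial group counts too.
--     groups = []
--     cur = []
--     for x in puzzle_input:
--         cur.append(x)
--         if x == 0:
--             groups.append(cur)
--             cur = []
--     if cur: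
--         groups.append(cur)
--
--     def best_prefix(group):
--         sums = []
--         s = 0
--         for v in group:
--             s += v
--             sums.append(s)
--         return max(sums)
--
--     return max([0] + [best_prefix(g) for g in groups])
-- ===== Notes on version B (the rewrite author's own statement) =====
-- stated objective: alternative
-- what changed: Replaces A's single fold with reset-on-zero state by a build-groups-then-map-and-reduce shape: split the input into zero-terminated groups, take the max of each group's prefix sums, and return the max of those with 0.
import Mathlib
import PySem

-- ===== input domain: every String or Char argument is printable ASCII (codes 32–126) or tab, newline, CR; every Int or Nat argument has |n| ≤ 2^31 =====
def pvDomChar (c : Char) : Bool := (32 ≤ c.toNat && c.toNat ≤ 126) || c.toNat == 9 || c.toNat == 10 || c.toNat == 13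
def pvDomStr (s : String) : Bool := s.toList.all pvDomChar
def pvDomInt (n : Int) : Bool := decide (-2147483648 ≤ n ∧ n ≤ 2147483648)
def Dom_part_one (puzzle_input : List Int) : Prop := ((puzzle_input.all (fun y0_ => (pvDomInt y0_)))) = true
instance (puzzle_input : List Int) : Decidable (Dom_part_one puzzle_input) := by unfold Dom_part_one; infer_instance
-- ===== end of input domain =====

-- B splits the input into zero-terminated groups and maps max-of-prefix-sums over them
-- (alternative decomposition, same cost; no speed claim).

-- ===== PORT A =====
-- single fold over (current_max, current_sum), resetting the sum after a zero
def part_one (puzzle_input : List Int) : Int :=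
  (puzzle_input.foldl
    (fun (st : Int × Int) line =>
      let current_sum := st.2 + line
      let current_max := max current_sum st.1
      (current_max, if line = 0 then 0 else current_sum))
    (0, 0)).1

-- ===== PORT B =====
-- 'if cur: groups.append(cur)' after the loop
def pvFin (st : List (List Int) × List Int) : List (List Int) :=
  if st.2 = [] then st.1 else st.1 ++ [st.2]

-- the grouping loop of Source B, as structural recursion over the same state (groups, cur)
def pvGroupLoop : List Int → List (List Int) → List Int → List (List Int) × List Int
  | [], groups, cur => (groups, cur)
  | x :: xs, groups, cur =>
    let cur' := cur ++ [x]
    if x = 0 then pvGroupLoop xs (groups ++ [cur']) []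
    else pvGroupLoop xs groups cur'

-- the prefix-sum loop of best_prefix
def pvPrefixLoop : List Int → List Int → Int → List Int
  | [], sums, _ => sums
  | v :: g, sums, s =>
    let s' := s + v
    pvPrefixLoop g (sums ++ [s']) s'

-- max(sums); Python max raises on [] — never reached, every group is nonempty
def pvBestPrefix (group : List Int) : Int :=
  match PySem.List.max? (pvPrefixLoop group [] 0) (fun y => y) with
  | some m => m
  | none => 0

def part_one_alt (puzzle_input : List Int) : Int :=
  let st := pvGroupLoop puzzle_input [] []
  let groups := pvFin st
  match PySem.List.max? (0 :: groups.map pvBestPrefix) (fun y => y) with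
  | some m => m
  | none => 0

-- ===== PRECONDITION & SPEC =====
def Spec_part_one (puzzle_input : List Int) (out : Int) : Prop := out = part_one_alt puzzle_input
instance (puzzle_input : List Int) (out : Int) : Decidable (Spec_part_one puzzle_input out) := by unfold Spec_part_one; infer_instance

-- ===== CLAIM (what is proved, stated in full; the proofs are below) =====
def Claim_equal_part_one : Prop := ∀ (puzzle_input : List Int), Dom_part_one puzzle_input → Spec_part_one puzzle_input (part_one puzzle_input)

-- ===== LEMMAS AND PROOFS =====

-- prefix sums of a list starting from s
def psums : List Int → Int → List Int
  | [], _ => []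
  | x :: xs, s => (s + x) :: psums xs (s + x)

-- the sequence of current_sum values A's loop visits
def cand : List Int → Int → List Int
  | [], _ => []
  | x :: xs, s => (s + x) :: cand xs (if x = 0 then 0 else s + x)

def allSums (gs : List (List Int)) : List Int := gs.flatMap (fun g => psums g 0)

theorem partA_eq_cand (xs : List Int) : ∀ m s : Int,
    (xs.foldl (fun (st : Int × Int) line =>
      let current_sum := st.2 + line
      let current_max := max current_sum st.1
      (current_max, if line = 0 then 0 else current_sum)) (m, s)).1
    = (cand xs s).foldl max m := by
  induction xs with
  | nil => intro m s; simp [cand]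
  | cons x xs ih =>
    intro m s
    simp only [List.foldl_cons, cand]
    rw [ih]
    congr 1
    exact max_comm _ _

theorem foldl_max_shift (l : List Int) : ∀ a b : Int,
    l.foldl max (max a b) = max a (l.foldl max b) := by
  induction l with
  | nil => intro a b; rfl
  | cons x l ih =>
    intro a b
    simp only [List.foldl_cons, max_assoc]
    exact ih a (max b x)

theorem psums_snoc (g : List Int) : ∀ s x : Int,
    psums (g ++ [x]) s = psums g s ++ [s + g.sum + x] := by
  induction g with
  | nil => intro s x; simp [psums]
  | cons a g ih =>
    intro s x
    simp only [List.cons_append, psums, ih, List.sum_cons]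
    ring_nf

theorem psums_ne_nil {g : List Int} (h : g ≠ []) (s : Int) : psums g s ≠ [] := by
  cases g with
  | nil => exact absurd rfl h
  | cons a g => simp [psums]

theorem pvPrefixLoop_eq (g : List Int) : ∀ sums : List Int, ∀ s : Int,
    pvPrefixLoop g sums s = sums ++ psums g s := by
  induction g with
  | nil => intro sums s; simp [pvPrefixLoop, psums]
  | cons v g ih =>
    intro sums s
    simp [pvPrefixLoop, psums, ih]

theorem allSums_fin (groups : List (List Int)) (cur : List Int) :
    allSums (pvFin (groups, cur)) = allSums groups ++ psums cur 0 := by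
  by_cases h : cur = []
  · subst h; simp [pvFin, allSums, psums]
  · simp [pvFin, h, allSums]

theorem groupLoop_allSums (xs : List Int) : ∀ groups cur,
    allSums (pvFin (pvGroupLoop xs groups cur))
      = allSums groups ++ psums cur 0 ++ cand xs cur.sum := by
  induction xs with
  | nil => intro groups cur; simp [pvGroupLoop, cand, allSums_fin]
  | cons x xs ih =>
    intro groups cur
    by_cases hx : x = 0
    · subst hx
      simp only [pvGroupLoop, if_true]
      rw [ih]
      simp only [allSums, List.flatMap_append, List.flatMap_cons, List.flatMap_nil,
        psums_snoc, psums, cand]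
      simp [List.append_assoc]
    · simp only [pvGroupLoop, if_neg hx]
      rw [ih]
      simp only [cand, if_neg hx, psums_snoc, List.sum_append, List.sum_cons,
        List.sum_nil]
      have h1 : 0 + cur.sum + x = cur.sum + x := by ring
      have h2 : cur.sum + (x + 0) = cur.sum + x := by ring
      rw [h1, h2]
      simp [List.append_assoc]


theorem groupLoop_ne_nil (xs : List Int) : ∀ groups cur,
    (∀ g ∈ groups, g ≠ []) →
    ∀ g ∈ pvFin (pvGroupLoop xs groups cur), g ≠ [] := by
  induction xs with
  | nil =>
    intro groups cur h g hg
    by_cases hc : cur = []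
    · subst hc; simp [pvGroupLoop, pvFin] at hg; exact h g hg
    · simp [pvGroupLoop, pvFin, hc] at hg
      rcases hg with hg | hg
      · exact h g hg
      · subst hg; exact hc
  | cons x xs ih =>
    intro groups cur h g hg
    by_cases hx : x = 0
    · subst hx
      simp only [pvGroupLoop, if_true] at hg
      refine ih _ _ ?_ g hg
      intro g' hg'
      rcases List.mem_append.1 hg' with hg' | hg'
      · exact h g' hg'
      · simp at hg'; subst hg'; simp
    · simp only [pvGroupLoop, if_neg hx] at hg
      exact ih _ _ h g hg

theorem bestPrefix_max {g : List Int} (h : g ≠ []) (a : Int) :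
    max a (pvBestPrefix g) = (psums g 0).foldl max a := by
  have hne := psums_ne_nil h (0 : Int)
  obtain ⟨hd, tl, he⟩ := List.exists_cons_of_ne_nil hne
  unfold pvBestPrefix
  rw [pvPrefixLoop_eq, List.nil_append, he, PySem.List.max?_id_cons]
  simp only [List.foldl_cons]
  rw [← foldl_max_shift]

theorem map_best_eq_allSums (gs : List (List Int)) :
    ∀ a : Int, (∀ g ∈ gs, g ≠ []) →
    (gs.map pvBestPrefix).foldl max a = (allSums gs).foldl max a := by
  induction gs with
  | nil => intro a _; simp [allSums]
  | cons g gs ih =>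
    intro a h
    simp only [List.map_cons, List.foldl_cons, allSums, List.flatMap_cons,
      List.foldl_append]
    rw [bestPrefix_max (h g (by simp)) a]
    exact ih _ (fun g' hg' => h g' (by simp [hg']))

-- ===== VERDICT (by name: the statement is the Claim_ definition above) =====
theorem part_one_spec : Claim_equal_part_one := by
  intro xs _
  show part_one xs = part_one_alt xs
  unfold part_one part_one_alt
  rw [partA_eq_cand]
  simp only [PySem.List.max?_id_cons]
  have hne : ∀ g ∈ pvFin (pvGroupLoop xs [] []), g ≠ [] :=
    groupLoop_ne_nil xs [] [] (by simp)
  have h2 := groupLoop_allSums xs [] []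
  simp only [allSums, List.flatMap_nil, psums, List.sum_nil, List.nil_append] at h2
  rw [map_best_eq_allSums _ 0 hne]
  unfold allSums
  rw [h2]
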